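-- pv_equiv track=rewrite | github.com/nikitachunikhin/Python_train_project | my_codewars_functions/lists/days_ represented_in_foreign_country.py | days_represented3
-- ===== SOURCE A (Python) =====
-- def days_represented3(trips):
--     days = set()
--     for trip in trips:
--         if trip[0] < trip[1]:  # exclude trip it end earlier than begin
--             for i in range(trip[0], trip[1]+1):
--                 days.add(i)
--
--
--     result = len(days)
--     return result
-- ===== SOURCE B (Python) =====
-- def days_represented3(trips):
--     # filter valid trips, sort by start, then one sweep adding only the newly covered days
--     valid = sorted(((t[0], t[1]) for t in trips if t[0] < t[1]), key=lambda p: p[0])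
--     total = 0
--     hi = None
--     for a, b in valid:
--         if hi is None or a > hi:
--             total += b - a + 1
--             hi = b
--         elif b > hi:
--             total += b - hi
--             hi = b
--     return total
-- ===== Notes on version B (the rewrite author's own statement) =====
-- stated objective: faster
-- what changed: Instead of materialising every covered day in a set, B sorts the valid (start,end) pairs by start and sweeps once, keeping the running maximum end and adding only the length of the newly covered segment.
import Mathlib
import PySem

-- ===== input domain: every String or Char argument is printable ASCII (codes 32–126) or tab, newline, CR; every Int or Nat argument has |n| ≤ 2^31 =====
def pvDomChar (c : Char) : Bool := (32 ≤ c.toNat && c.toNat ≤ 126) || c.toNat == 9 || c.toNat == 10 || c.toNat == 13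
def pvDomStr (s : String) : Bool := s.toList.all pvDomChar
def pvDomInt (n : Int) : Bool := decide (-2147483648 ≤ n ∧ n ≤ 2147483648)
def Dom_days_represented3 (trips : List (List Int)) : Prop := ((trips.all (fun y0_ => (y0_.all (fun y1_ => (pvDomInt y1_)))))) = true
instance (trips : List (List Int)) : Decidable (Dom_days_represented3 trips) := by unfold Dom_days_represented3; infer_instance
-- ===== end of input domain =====

-- B replaces A's day-by-day set filling with sort-by-start + one sweep over merged intervals (measurably faster on large spans).


-- ===== PORT A =====
-- trip[0] / trip[1] ported as pyGetD trip i 0: exact on Pre_ (every trip has ≥ 2 entries; outside Pre_ Python raises IndexError).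
-- 'days' is ported as a tree set of Ints: the loops are Python's, and the result uses the set only through len,
-- which does not depend on the container (a list-backed set would not be evaluable on large day spans).
def days_represented3 (trips : List (List Int)) : Int :=
  let days : Std.TreeSet Int compare :=
    trips.foldl (fun (days : Std.TreeSet Int compare) trip =>
      if PySem.List.pyGetD trip 0 0 < PySem.List.pyGetD trip 1 0 then
        (PySem.List.pyRange (PySem.List.pyGetD trip 0 0) (PySem.List.pyGetD trip 1 0 + 1)).foldl
          (fun d i => d.insert i) days
      else days) Std.TreeSet.empty
  (days.size : Int)

-- ===== PORT B =====
-- one sweep step: state (total, highest end seen so far)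
def bStep (s : Int × Option Int) (p : Int × Int) : Int × Option Int :=
  match s.2 with
  | none => (s.1 + (p.2 - p.1 + 1), some p.2)
  | some hi =>
    if hi < p.1 then (s.1 + (p.2 - p.1 + 1), some p.2)
    else if hi < p.2 then (s.1 + (p.2 - hi), some p.2)
    else s

def days_represented3_alt (trips : List (List Int)) : Int :=
  let valid := PySem.List.sorted
    ((trips.filter (fun t => PySem.List.pyGetD t 0 0 < PySem.List.pyGetD t 1 0)).map
      (fun t => (PySem.List.pyGetD t 0 0, PySem.List.pyGetD t 1 0)))
    (fun p => p.1) false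
  (valid.foldl bStep (0, none)).1

-- ===== PRECONDITION & SPEC =====
-- Pre_ excludes exactly the inputs where Python's trip[0]/trip[1] raises IndexError (a trip with fewer than two entries).
def Pre_days_represented3 (trips : List (List Int)) : Prop := ∀ t ∈ trips, 2 ≤ t.length
instance (trips : List (List Int)) : Decidable (Pre_days_represented3 trips) := by unfold Pre_days_represented3; infer_instance
def pvWitness_days_represented3 : List (List Int) := [[1, 4], [7, 5], [3, 6], [10, 12]]
def Spec_days_represented3 (trips : List (List Int)) (out : Int) : Prop := out = days_represented3_alt trips
instance (trips : List (List Int)) (out : Int) : Decidable (Spec_days_represented3 trips out) := by unfold Spec_days_represented3; infer_instance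

-- ===== CLAIM (what is proved, stated in full; the proofs are below) =====
def Claim_equal_days_represented3 : Prop := ∀ (trips : List (List Int)), Dom_days_represented3 trips → Pre_days_represented3 trips → Spec_days_represented3 trips (days_represented3 trips)

-- ===== LEMMAS AND PROOFS =====

-- the days of the closed interval [a, b], as a finite set
def Itv (a b : Int) : Finset Int := (PySem.List.pyRange a (b + 1)).toFinset

-- the set of days covered by a list of (start, end) pairs
def U (l : List (Int × Int)) : Finset Int := l.foldr (fun p acc => Itv p.1 p.2 ∪ acc) ∅

-- the part of a finite set of days strictly above hi
def above (s : Finset Int) (hi : Int) : Finset Int := s.filter (fun x => hi < x)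

theorem mem_Itv {a b x : Int} : x ∈ Itv a b ↔ a ≤ x ∧ x ≤ b := by
  simp only [Itv, List.mem_toFinset, PySem.List.mem_pyRange_one]; omega

theorem card_Itv (a b : Int) : (Itv a b).card = (b + 1 - a).toNat := by
  have : Itv a b = Finset.Icc a b := by
    apply Finset.ext; intro x; rw [mem_Itv, Finset.mem_Icc]
  rw [this, Int.card_Icc]

theorem mem_above {s : Finset Int} {hi x : Int} : x ∈ above s hi ↔ x ∈ s ∧ hi < x := by
  simp [above]

theorem above_Itv (a b hi : Int) : above (Itv a b) hi = Itv (max a (hi + 1)) b := by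
  apply Finset.ext; intro x; rw [mem_above, mem_Itv, mem_Itv]; omega

theorem mem_U {l : List (Int × Int)} {x : Int} : x ∈ U l ↔ ∃ p ∈ l, p.1 ≤ x ∧ x ≤ p.2 := by
  induction l with
  | nil => simp [U]
  | cons p rest ih =>
    show x ∈ Itv p.1 p.2 ∪ U rest ↔ _
    rw [Finset.mem_union, mem_Itv, ih]
    simp only [List.mem_cons]
    constructor
    · rintro (h | ⟨q, hq, hs⟩)
      · exact ⟨p, Or.inl rfl, h⟩
      · exact ⟨q, Or.inr hq, hs⟩
    · rintro ⟨q, (rfl | hq), hs⟩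
      · exact Or.inl hs
      · exact Or.inr ⟨q, hq, hs⟩

-- the valid trips of the input, as (start, end) pairs
def validOf (trips : List (List Int)) : List (Int × Int) :=
  (trips.filter (fun t => PySem.List.pyGetD t 0 0 < PySem.List.pyGetD t 1 0)).map
    (fun t => (PySem.List.pyGetD t 0 0, PySem.List.pyGetD t 1 0))

-- ==== A-side: the built set has no duplicates and its members are the covered days ====

theorem insFold_mem (xs : List Int) (d : Std.TreeSet Int compare) (x : Int) :
    x ∈ xs.foldl (fun d i => d.insert i) d ↔ x ∈ d ∨ x ∈ xs := by
  induction xs generalizing d with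
  | nil => simp
  | cons y ys ih =>
    simp only [List.foldl_cons, ih, Std.TreeSet.mem_insert, compare_eq_iff_eq, List.mem_cons]
    tauto

theorem treeSet_toList_nodup (t : Std.TreeSet Int compare) : t.toList.Nodup := by
  have h := Std.TreeSet.distinct_toList (t := t)
  exact h.imp (by intro a b hab; simp at hab; exact hab)

theorem aSet_mem (trips : List (List Int)) (days : Std.TreeSet Int compare) (x : Int) :
    x ∈ (trips.foldl (fun (days : Std.TreeSet Int compare) trip =>
      if PySem.List.pyGetD trip 0 0 < PySem.List.pyGetD trip 1 0 then
        (PySem.List.pyRange (PySem.List.pyGetD trip 0 0) (PySem.List.pyGetD trip 1 0 + 1)).foldl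
          (fun d i => d.insert i) days
      else days) days)
    ↔ x ∈ days ∨ ∃ t ∈ trips, PySem.List.pyGetD t 0 0 < PySem.List.pyGetD t 1 0 ∧
        PySem.List.pyGetD t 0 0 ≤ x ∧ x ≤ PySem.List.pyGetD t 1 0 := by
  induction trips generalizing days with
  | nil => simp
  | cons t rest ih =>
    simp only [List.foldl_cons]
    by_cases h : PySem.List.pyGetD t 0 0 < PySem.List.pyGetD t 1 0
    · rw [if_pos h, ih, insFold_mem]
      simp only [PySem.List.mem_pyRange_one, List.mem_cons]
      constructor
      · rintro (⟨hx | hx⟩ | ⟨u, hu, h1, h2, h3⟩)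
        · exact Or.inl hx
        · exact Or.inr ⟨t, Or.inl rfl, h, hx.1, by omega⟩
        · exact Or.inr ⟨u, Or.inr hu, h1, h2, h3⟩
      · rintro (hx | ⟨u, (rfl | hu), h1, h2, h3⟩)
        · exact Or.inl (Or.inl hx)
        · exact Or.inl (Or.inr ⟨h2, by omega⟩)
        · exact Or.inr ⟨u, hu, h1, h2, h3⟩
    · rw [if_neg h, ih]
      constructor
      · rintro (hx | ⟨u, hu, hs⟩)
        · exact Or.inl hx
        · exact Or.inr ⟨u, List.mem_cons_of_mem _ hu, hs⟩
      · rintro (hx | ⟨u, hu, hs⟩)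
        · exact Or.inl hx
        · rcases List.mem_cons.mp hu with rfl | hu
          · exact absurd hs.1 h
          · exact Or.inr ⟨u, hu, hs⟩

theorem a_eq_card (trips : List (List Int)) :
    days_represented3 trips = ((U (validOf trips)).card : Int) := by
  show ((trips.foldl (fun (days : Std.TreeSet Int compare) trip =>
      if PySem.List.pyGetD trip 0 0 < PySem.List.pyGetD trip 1 0 then
        (PySem.List.pyRange (PySem.List.pyGetD trip 0 0) (PySem.List.pyGetD trip 1 0 + 1)).foldl
          (fun d i => d.insert i) days
      else days) Std.TreeSet.empty).size : Int) = _
  congr 1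
  rw [← Std.TreeSet.length_toList, ← List.toFinset_card_of_nodup (treeSet_toList_nodup _)]
  congr 1
  apply Finset.ext
  intro x
  rw [List.mem_toFinset, Std.TreeSet.mem_toList, aSet_mem, mem_U]
  constructor
  · rintro (hx | ⟨t, ht, hlt, hs⟩)
    · simp at hx
    · exact ⟨(PySem.List.pyGetD t 0 0, PySem.List.pyGetD t 1 0),
        List.mem_map.mpr ⟨t, List.mem_filter.mpr ⟨ht, by simpa using hlt⟩, rfl⟩, hs⟩
  · rintro ⟨p, hp, hs⟩
    rcases List.mem_map.mp hp with ⟨t, ht, rfl⟩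
    rcases List.mem_filter.mp ht with ⟨ht, hlt⟩
    exact Or.inr ⟨t, ht, by simpa using hlt, hs⟩

-- ==== B-side: the sweep counts the covered days above the running maximum ====

theorem key_card (a b hi : Int) (rest : List (Int × Int))
    (hst : ∀ q ∈ rest, a ≤ q.1) :
    (above (Itv a b ∪ U rest) hi).card
      = (above (Itv a b) hi).card + (above (U rest) (max hi b)).card := by
  have hset : above (Itv a b ∪ U rest) hi
      = above (Itv a b) hi ∪ above (U rest) (max hi b) := by
    apply Finset.ext; intro x
    simp only [mem_above, Finset.mem_union, mem_Itv]
    constructor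
    · rintro ⟨hab' | hu, hhi⟩
      · exact Or.inl ⟨hab', hhi⟩
      · by_cases hb : max hi b < x
        · exact Or.inr ⟨hu, hb⟩
        · rcases mem_U.mp hu with ⟨q, hq, h1, h2⟩
          exact Or.inl ⟨⟨le_trans (hst q hq) h1, by omega⟩, hhi⟩
    · rintro (⟨hx, hhi⟩ | ⟨hu, hb⟩)
      · exact ⟨Or.inl hx, hhi⟩
      · exact ⟨Or.inr hu, by omega⟩
  rw [hset, Finset.card_union_of_disjoint]
  rw [Finset.disjoint_left]
  intro x hx hy
  rw [mem_above, mem_Itv] at hx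
  rw [mem_above] at hy
  omega

theorem sweep_some (l : List (Int × Int)) (total hi : Int)
    (hvalid : ∀ q ∈ l, q.1 ≤ q.2) (hsort : l.Pairwise (fun p q => p.1 ≤ q.1)) :
    (l.foldl bStep (total, some hi)).1 = total + ((above (U l) hi).card : Int) := by
  induction l generalizing total hi with
  | nil => simp [U, above]
  | cons p rest ih =>
    obtain ⟨a, b⟩ := p
    have hab : a ≤ b := hvalid (a, b) (List.mem_cons_self ..)
    have hst : ∀ q ∈ rest, a ≤ q.1 := fun q hq => (List.pairwise_cons.mp hsort).1 q hq
    have hrest_valid : ∀ q ∈ rest, q.1 ≤ q.2 := fun q hq => hvalid q (List.mem_cons_of_mem _ hq)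
    have hrest_sort := (List.pairwise_cons.mp hsort).2
    have hU : U ((a, b) :: rest) = Itv a b ∪ U rest := rfl
    have hkey := key_card a b hi rest hst
    simp only [List.foldl_cons, bStep]
    by_cases h1 : hi < a
    · rw [if_pos h1, ih _ _ hrest_valid hrest_sort, hU]
      have hmax : max hi b = b := by omega
      have hicc : (above (Itv a b) hi).card = (b - a + 1).toNat := by
        rw [above_Itv, card_Itv]; congr 1; omega
      rw [hkey, hicc, hmax]; push_cast; omega
    · rw [if_neg h1]
      by_cases h2 : hi < b
      · rw [if_pos h2, ih _ _ hrest_valid hrest_sort, hU]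
        have hmax : max hi b = b := by omega
        have hicc : (above (Itv a b) hi).card = (b - hi).toNat := by
          rw [above_Itv, card_Itv]; congr 1; omega
        rw [hkey, hicc, hmax]; push_cast; omega
      · rw [if_neg h2, ih _ _ hrest_valid hrest_sort, hU]
        have hmax : max hi b = hi := by omega
        have hicc : (above (Itv a b) hi).card = 0 := by
          rw [above_Itv, card_Itv]; omega
        rw [hkey, hicc, hmax]; push_cast; omega

theorem b_eq_card (trips : List (List Int)) :
    days_represented3_alt trips
      = ((U (PySem.List.sorted (validOf trips) (fun p => p.1) false)).card : Int) := by
  unfold days_represented3_alt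
  have hvalid : ∀ q ∈ PySem.List.sorted (validOf trips) (fun p => p.1) false, q.1 < q.2 := by
    intro q hq
    rw [PySem.List.mem_sorted] at hq
    simp only [validOf, List.mem_map, List.mem_filter] at hq
    obtain ⟨t, ⟨_, ht⟩, rfl⟩ := hq
    simpa using ht
  have hsort := PySem.List.sorted_pairwise (validOf trips) (fun p => p.1)
  show ((PySem.List.sorted (validOf trips) (fun p => p.1) false).foldl bStep (0, none)).1 = _
  set l := PySem.List.sorted (validOf trips) (fun p => p.1) false with hl
  clear_value l
  cases l with
  | nil => simp [U]
  | cons p rest =>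
    obtain ⟨a, b⟩ := p
    have hab : a ≤ b := le_of_lt (hvalid (a, b) (List.mem_cons_self ..))
    have hst : ∀ q ∈ rest, a ≤ q.1 := fun q hq => (List.pairwise_cons.mp hsort).1 q hq
    simp only [List.foldl_cons, bStep]
    rw [sweep_some rest (0 + (b - a + 1)) b
      (fun q hq => le_of_lt (hvalid q (List.mem_cons_of_mem _ hq)))
      (List.pairwise_cons.mp hsort).2]
    have hU : U ((a, b) :: rest) = Itv a b ∪ U rest := rfl
    have hkey := key_card a b (a - 1) rest hst
    have hnone : above (Itv a b ∪ U rest) (a - 1) = Itv a b ∪ U rest := by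
      apply Finset.ext; intro x
      rw [mem_above]
      constructor
      · exact fun h => h.1
      · intro hx
        refine ⟨hx, ?_⟩
        rcases Finset.mem_union.mp hx with hx | hx
        · have := mem_Itv.mp hx; omega
        · rcases mem_U.mp hx with ⟨q, hq, h1, h2⟩
          have := hst q hq; omega
    have hmax : max (a - 1) b = b := by omega
    have hicc : (above (Itv a b) (a - 1)).card = (b - a + 1).toNat := by
      rw [above_Itv, card_Itv]; congr 1; omega
    rw [hU, ← hnone, hkey, hicc, hmax]
    push_cast; omega

theorem U_sorted_eq (trips : List (List Int)) :
    U (PySem.List.sorted (validOf trips) (fun p => p.1) false) = U (validOf trips) := by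
  apply Finset.ext; intro x
  rw [mem_U, mem_U]
  constructor <;> rintro ⟨q, hq, hs⟩
  · exact ⟨q, (PySem.List.sorted_perm _ _ _).mem_iff.mp hq, hs⟩
  · exact ⟨q, (PySem.List.sorted_perm _ _ _).mem_iff.mpr hq, hs⟩

-- ===== VERDICT (by name: the statement is the Claim_ definition above) =====
theorem days_represented3_spec : Claim_equal_days_represented3 := by
  intro trips _ _
  unfold Spec_days_represented3
  rw [a_eq_card, b_eq_card, U_sorted_eq]
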